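-- pv_equiv track=rewrite | github.com/kuzmenko86/OlenivkaSvitloBot | dtek_schedule.py | _off_segments_from_slots
-- ===== SOURCE A (Python) =====
-- from typing import Any
--
-- def _off_segments_from_slots(slots: list[dict[str, Any]]) -> list[tuple[int, int]]:
--     # Переходимо в півгодинні інтервали 0..47
--     off_half_hours = []
--     for i, slot in enumerate(slots):
--         st = slot.get("status")
--         half_idx = i * 2
--         if st == "off":
--             off_half_hours.extend([half_idx, half_idx + 1])
--         elif st == "first_half_off":
--             off_half_hours.append(half_idx)
--         elif st == "second_half_off":
--             off_half_hours.append(half_idx + 1)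
--
--     if not off_half_hours:
--         return []
--
--     off_half_hours = sorted(set(off_half_hours))
--     segments = []
--     start = off_half_hours[0]
--     prev = off_half_hours[0]
--
--     for x in off_half_hours[1:]:
--         if x == prev + 1:
--             prev = x
--         else:
--             segments.append((start * 30, (prev + 1) * 30))
--             start = x
--             prev = x
--     segments.append((start * 30, (prev + 1) * 30))
--     return segments
-- ===== SOURCE B (Python) =====
-- def _off_segments_from_slots(slots):
--     result = []
--     open_seg = None  # current open (start_minute, end_minute)
--     for i, slot in enumerate(slots):
--         st = slot.get("status")
--         base = i * 60
--         if st == "off":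
--             ivs = [(base, base + 60)]
--         elif st == "first_half_off":
--             ivs = [(base, base + 30)]
--         elif st == "second_half_off":
--             ivs = [(base + 30, base + 60)]
--         else:
--             ivs = []
--         for a, b in ivs:
--             if open_seg is not None and a == open_seg[1]:
--                 open_seg = (open_seg[0], b)
--             else:
--                 if open_seg is not None:
--                     result.append(open_seg)
--                 open_seg = (a, b)
--     if open_seg is not None:
--         result.append(open_seg)
--     return result
-- ===== Notes on version B (the rewrite author's own statement) =====
-- stated objective: simpler
-- what changed: B replaces A's two-phase pipeline (collect half-hour indices, sorted(set(...)), then a second merge loop) with one pass over the slots that maps each status to minute intervals and folds them into an open segment that is extended or flushed on the fly.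
import Mathlib
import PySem

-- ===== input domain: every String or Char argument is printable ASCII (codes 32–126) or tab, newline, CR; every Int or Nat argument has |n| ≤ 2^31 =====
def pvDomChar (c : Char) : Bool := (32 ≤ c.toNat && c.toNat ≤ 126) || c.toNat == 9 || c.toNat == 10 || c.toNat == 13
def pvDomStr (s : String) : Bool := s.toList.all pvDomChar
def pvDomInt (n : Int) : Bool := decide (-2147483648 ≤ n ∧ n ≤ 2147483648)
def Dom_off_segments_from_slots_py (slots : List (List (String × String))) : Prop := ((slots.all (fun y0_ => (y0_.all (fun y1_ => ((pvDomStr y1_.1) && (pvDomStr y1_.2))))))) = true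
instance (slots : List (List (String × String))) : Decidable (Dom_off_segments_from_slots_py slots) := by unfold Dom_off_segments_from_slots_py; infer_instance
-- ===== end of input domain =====

-- B replaces A's collect/sorted(set)/re-merge pipeline with a single pass keeping an open
-- minute segment that is extended or flushed slot by slot (objective: simpler).


-- ===== PORT A =====
-- transliteration of A: collect half-hour indices, sorted(set(...)), then merge consecutive runs
def off_segments_from_slots_py (slots : List (List (String × String))) : List (Int × Int) :=
  let off_half_hours : List Int :=
    (PySem.List.enumerate slots 0).foldl (fun acc p =>
      let st := PySem.Dict.get? (PySem.Dict.mk p.2) "status"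
      let half_idx := p.1 * 2
      if st = some "off" then acc ++ [half_idx, half_idx + 1]
      else if st = some "first_half_off" then acc ++ [half_idx]
      else if st = some "second_half_off" then acc ++ [half_idx + 1]
      else acc) []
  if off_half_hours = [] then []
  else
    match PySem.List.sorted (PySem.Set.ofList off_half_hours) (fun x => x) false with
    | [] => []  -- unreachable (sorted(set(L)) of nonempty L is nonempty)
    | h :: t =>
      let r := t.foldl (fun (s : List (Int × Int) × Int × Int) x =>
          if x = s.2.2 + 1 then (s.1, s.2.1, x)
          else (s.1 ++ [(s.2.1 * 30, (s.2.2 + 1) * 30)], x, x)) ([], h, h)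
      r.1 ++ [(r.2.1 * 30, (r.2.2 + 1) * 30)]

-- ===== PORT B =====
-- minute intervals a slot contributes, from its status
def pvIvs (i : Int) (st : Option String) : List (Int × Int) :=
  if st = some "off" then [(i * 60, i * 60 + 60)]
  else if st = some "first_half_off" then [(i * 60, i * 60 + 30)]
  else if st = some "second_half_off" then [(i * 60 + 30, i * 60 + 60)]
  else []

-- fold one interval into (finished segments, open segment)
def pvStep (s : List (Int × Int) × Option (Int × Int)) (iv : Int × Int) :
    List (Int × Int) × Option (Int × Int) :=
  match s.2 with
  | some ab => if iv.1 = ab.2 then (s.1, some (ab.1, iv.2)) else (s.1 ++ [ab], some iv)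
  | none => (s.1, some iv)

def off_segments_from_slots_py_alt (slots : List (List (String × String))) : List (Int × Int) :=
  let r := (PySem.List.enumerate slots 0).foldl
      (fun s p => (pvIvs p.1 (PySem.Dict.get? (PySem.Dict.mk p.2) "status")).foldl pvStep s)
      ([], none)
  match r.2 with
  | none => r.1
  | some seg => r.1 ++ [seg]

-- ===== PRECONDITION & SPEC =====
def Spec_off_segments_from_slots_py (slots : List (List (String × String))) (out : List (Int × Int)) : Prop := out = off_segments_from_slots_py_alt slots
instance (slots : List (List (String × String))) (out : List (Int × Int)) : Decidable (Spec_off_segments_from_slots_py slots out) := by unfold Spec_off_segments_from_slots_py; infer_instance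

-- ===== CLAIM (what is proved, stated in full; the proofs are below) =====
def Claim_equal_off_segments_from_slots_py : Prop := ∀ (slots : List (List (String × String))), Dom_off_segments_from_slots_py slots → Spec_off_segments_from_slots_py slots (off_segments_from_slots_py slots)

-- ===== LEMMAS AND PROOFS =====

-- the half-hour indices a slot contributes
def pvHalves (i : Int) (st : Option String) : List Int :=
  if st = some "off" then [i * 2, i * 2 + 1]
  else if st = some "first_half_off" then [i * 2]
  else if st = some "second_half_off" then [i * 2 + 1]
  else []

-- the full strictly increasing list of off half-hours
def pvL (slots : List (List (String × String))) (s : Int) : List Int :=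
  match slots with
  | [] => []
  | slot :: rest => pvHalves s (PySem.Dict.get? (PySem.Dict.mk slot) "status") ++ pvL rest (s + 1)

theorem pvA_halves (slots : List (List (String × String))) (s : Int) (acc : List Int) :
    (PySem.List.enumerate slots s).foldl (fun acc p =>
      let st := PySem.Dict.get? (PySem.Dict.mk p.2) "status"
      let half_idx := p.1 * 2
      if st = some "off" then acc ++ [half_idx, half_idx + 1]
      else if st = some "first_half_off" then acc ++ [half_idx]
      else if st = some "second_half_off" then acc ++ [half_idx + 1]
      else acc) acc = acc ++ pvL slots s := by
  induction slots generalizing s acc with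
  | nil => simp [pvL, PySem.List.enumerate_nil]
  | cons slot rest ih =>
      rw [PySem.List.enumerate_cons, List.foldl_cons, ih]
      simp only [pvL, pvHalves]
      split_ifs <;> simp

theorem pvL_bounds (slots : List (List (String × String))) (s : Int) :
    (∀ y ∈ pvL slots s, s * 2 ≤ y) ∧ (pvL slots s).Pairwise (· < ·) := by
  induction slots generalizing s with
  | nil => simp [pvL]
  | cons slot rest ih =>
      obtain ⟨hlb, hpw⟩ := ih (s + 1)
      constructor
      · intro y hy
        simp only [pvL, List.mem_append] at hy
        rcases hy with hy | hy
        · unfold pvHalves at hy; split_ifs at hy <;> simp at hy <;> omega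
        · have := hlb y hy; omega
      · simp only [pvL]
        refine List.pairwise_append.mpr ⟨?_, hpw, ?_⟩
        · unfold pvHalves; split_ifs <;> simp
        · intro x hx y hy
          have h2 : (s + 1) * 2 ≤ y := hlb y hy
          unfold pvHalves at hx; split_ifs at hx <;> simp at hx <;> omega

theorem pv_ofList_self {α : Type} [BEq α] [LawfulBEq α] (l : List α) (hnd : l.Nodup) :
    PySem.Set.ofList l = l := by
  have main : ∀ (l : List α), l.Nodup → ∀ acc : List α, (∀ x ∈ l, x ∉ acc) →
      l.foldl PySem.Set.add acc = acc ++ l := by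
    intro l
    induction l with
    | nil => intro _ acc _; simp
    | cons a t ih =>
        intro hnd acc hdisj
        obtain ⟨hat, htn⟩ := List.nodup_cons.mp hnd
        have ha : a ∉ acc := hdisj a (by simp)
        rw [List.foldl_cons]
        have hadd : PySem.Set.add acc a = acc ++ [a] := by
          simp [PySem.Set.add, PySem.Set.contains, List.contains_eq_mem, ha]
        rw [hadd, ih htn (acc ++ [a]) ?_]
        · simp
        · intro x hx
          simp only [List.mem_append, List.mem_singleton]
          rintro (h | rfl)
          · exact hdisj x (by simp [hx]) h
          · exact hat hx
  have h := main l hnd [] (by simp)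
  simpa [PySem.Set.ofList_eq_foldl] using h

-- sorted(set(L)) = L for a strictly increasing L
theorem pv_sorted_set_self (l : List Int) (hpw : l.Pairwise (· < ·)) :
    PySem.List.sorted (PySem.Set.ofList l) (fun x => x) false = l := by
  rw [pv_ofList_self l hpw.nodup]
  exact PySem.List.sorted_eq_self_of_pairwise _ _ (hpw.imp (fun h => le_of_lt h))

-- B's fold over a slot's intervals equals half-index-wise stepping
theorem pvStep_halves (i : Int) (st : Option String) (s : List (Int × Int) × Option (Int × Int)) :
    (pvIvs i st).foldl pvStep s = (pvHalves i st).foldl (fun s x => pvStep s (x * 30, x * 30 + 30)) s := by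
  have e1 : i * 2 * 30 = i * 60 := by ring
  have e3 : (i * 2 + 1) * 30 = i * 60 + 30 := by ring
  unfold pvIvs pvHalves
  have e5 : i * 60 + 30 + 30 = i * 60 + 60 := by omega
  split_ifs <;> simp only [List.foldl_cons, List.foldl_nil, e1, e3, e5]
  · -- "off": one 60-minute interval vs two adjacent 30-minute ones
    rcases s with ⟨segs, cur⟩
    cases cur with
    | none => simp [pvStep]
    | some ab =>
        rcases ab with ⟨a, b⟩
        by_cases h : i * 60 = b <;> simp [pvStep, h]

-- B's whole fold equals half-index-wise stepping over pvL
theorem pvB_halves (slots : List (List (String × String))) (s : Int)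
    (st : List (Int × Int) × Option (Int × Int)) :
    (PySem.List.enumerate slots s).foldl
      (fun s p => (pvIvs p.1 (PySem.Dict.get? (PySem.Dict.mk p.2) "status")).foldl pvStep s) st
    = (pvL slots s).foldl (fun s x => pvStep s (x * 30, x * 30 + 30)) st := by
  induction slots generalizing s st with
  | nil => simp [pvL, PySem.List.enumerate_nil]
  | cons slot rest ih =>
      rw [PySem.List.enumerate_cons, List.foldl_cons, ih, pvStep_halves]
      simp [pvL, List.foldl_append]

-- the two merge loops agree, given the state correspondence
theorem pv_merge_agree (t : List Int) (segs : List (Int × Int)) (start prev : Int) :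
    (let r := t.foldl (fun (s : List (Int × Int) × Int × Int) x =>
          if x = s.2.2 + 1 then (s.1, s.2.1, x)
          else (s.1 ++ [(s.2.1 * 30, (s.2.2 + 1) * 30)], x, x)) (segs, start, prev)
     r.1 ++ [(r.2.1 * 30, (r.2.2 + 1) * 30)])
    = (let r := t.foldl (fun s x => pvStep s (x * 30, x * 30 + 30))
          (segs, some (start * 30, (prev + 1) * 30))
       match r.2 with
       | none => r.1
       | some seg => r.1 ++ [seg]) := by
  induction t generalizing segs start prev with
  | nil => simp
  | cons x xs ih =>
      simp only [List.foldl_cons]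
      by_cases h : x = prev + 1
      · have hB : pvStep (segs, some (start * 30, (prev + 1) * 30)) (x * 30, x * 30 + 30)
            = (segs, some (start * 30, (x + 1) * 30)) := by
          simp only [pvStep]
          rw [if_pos (by omega : (x * 30 : Int) = (prev + 1) * 30)]
          have hx1 : x * 30 + 30 = (x + 1) * 30 := by ring
          rw [hx1]
        rw [if_pos h, hB]
        exact ih segs start x
      · have hB : pvStep (segs, some (start * 30, (prev + 1) * 30)) (x * 30, x * 30 + 30)
            = (segs ++ [(start * 30, (prev + 1) * 30)], some (x * 30, (x + 1) * 30)) := by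
          simp only [pvStep]
          rw [if_neg (by omega : ¬ (x * 30 : Int) = (prev + 1) * 30)]
          have hx1 : x * 30 + 30 = (x + 1) * 30 := by ring
          rw [hx1]
        rw [if_neg h, hB]
        exact ih (segs ++ [(start * 30, (prev + 1) * 30)]) x x

-- ===== VERDICT (by name: the statement is the Claim_ definition above) =====
theorem off_segments_from_slots_py_spec : Claim_equal_off_segments_from_slots_py := by
  intro slots _
  unfold Spec_off_segments_from_slots_py off_segments_from_slots_py off_segments_from_slots_py_alt
  simp only [pvA_halves slots 0 [], pvB_halves slots 0 ([], none), List.nil_append]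
  obtain ⟨_, hpw⟩ := pvL_bounds slots 0
  rw [pv_sorted_set_self _ hpw]
  cases hL : pvL slots 0 with
  | nil => simp
  | cons h t =>
      simp only [if_neg (by simp : ¬ (h :: t = ([] : List Int)))]
      have hfirst : pvStep ([], none) (h * 30, h * 30 + 30) = ([], some (h * 30, (h + 1) * 30)) := by
        simp [pvStep]; ring
      rw [List.foldl_cons, hfirst]
      exact pv_merge_agree t [] h h
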